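-- pv_equiv track=rewrite | github.com/flowers-huang/cs152bots | DiscordBot/bot.py | eval_links
-- ===== SOURCE A (Python) =====
-- def eval_links(links):
--     safety = True
--
--     for link in links:
--         for char in link:
--             # if english alphabetical, ignore
--             if (char >= 'a' and char <= 'z') or (char >= 'A' and char <= 'Z'):
--                 continue
--             # if char is not a symbol -- must be alt chars
--             elif char not in ":/?#[]@!$&'()*+,;=.":
--                 safety = False
--                 return safety
--
--     return safety
-- ===== SOURCE B (Python) =====
-- ALLOWED = set("abcdefghijklmnopqrstuvwxyzABCDEFGHIJKLMNOPQRSTUVWXYZ:/?#[]@!$&'()*+,;=.")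
--
-- def eval_links(links):
--     used = set(''.join(links))
--     return used.issubset(ALLOWED)
-- ===== Notes on version B (the rewrite author's own statement) =====
-- stated objective: simpler
-- what changed: Replaces the short-circuiting nested character scan with a running boolean by joining all links, collecting the set of characters actually used, and returning one subset test against a precomputed allowed-character set.
import Mathlib
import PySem

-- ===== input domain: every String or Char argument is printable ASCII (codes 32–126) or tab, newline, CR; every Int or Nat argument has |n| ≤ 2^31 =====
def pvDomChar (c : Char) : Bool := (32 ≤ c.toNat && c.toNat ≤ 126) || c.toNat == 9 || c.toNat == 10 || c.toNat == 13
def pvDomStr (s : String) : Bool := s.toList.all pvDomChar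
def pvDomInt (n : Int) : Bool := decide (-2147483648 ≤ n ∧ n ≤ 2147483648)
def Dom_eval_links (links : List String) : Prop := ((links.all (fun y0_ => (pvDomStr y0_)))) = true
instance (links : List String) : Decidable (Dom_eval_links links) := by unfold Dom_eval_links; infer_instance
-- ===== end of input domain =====

-- B joins all links, collects the set of characters used, and does one subset test against a
-- precomputed allowed-character set, instead of A's short-circuiting nested scan (objective: simpler).

-- ===== PORT A =====
-- the inner 'for char in link' loop: letters skipped, a non-symbol char returns False immediately
def pvScanChars : List Char → Bool
  | [] => true
  | c :: rest =>
    if (('a' ≤ c && c ≤ 'z') || ('A' ≤ c && c ≤ 'Z')) then pvScanChars rest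
    else if !(":/?#[]@!$&'()*+,;=.".toList.contains c) then false
    else pvScanChars rest

-- the outer 'for link in links' loop with the early return threaded through
def pvScanLinks : List String → Bool
  | [] => true
  | l :: rest => if pvScanChars l.toList then pvScanLinks rest else false

def eval_links (links : List String) : Bool := pvScanLinks links

-- ===== PORT B =====
def pvAllowed : PySem.Set Char :=
  PySem.Set.ofList "abcdefghijklmnopqrstuvwxyzABCDEFGHIJKLMNOPQRSTUVWXYZ:/?#[]@!$&'()*+,;=.".toList

def eval_links_alt (links : List String) : Bool :=
  let used : PySem.Set Char := PySem.Set.ofList (PySem.Str.join "" links).toList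
  PySem.Set.issubset used pvAllowed

-- ===== PRECONDITION & SPEC =====
def Spec_eval_links (links : List String) (out : Bool) : Prop := out = eval_links_alt links
instance (links : List String) (out : Bool) : Decidable (Spec_eval_links links out) := by unfold Spec_eval_links; infer_instance

-- ===== CLAIM (what is proved, stated in full; the proofs are below) =====
def Claim_equal_eval_links : Prop := ∀ (links : List String), Dom_eval_links links → Spec_eval_links links (eval_links links)

-- ===== LEMMAS AND PROOFS =====

theorem pv_char_le_iff {a b : Char} : a ≤ b ↔ a.toNat ≤ b.toNat := by
  rw [Char.le_def]; exact UInt32.le_iff_toNat_le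

theorem pv_char_toNat_inj {a b : Char} (h : a.toNat = b.toNat) : a = b :=
  Char.ext (UInt32.toNat_inj.mp h)

theorem pv_mem_map_toNat {c : Char} {l : List Char} : c ∈ l ↔ c.toNat ∈ l.map Char.toNat := by
  constructor
  · intro h; exact List.mem_map.mpr ⟨c, h, rfl⟩
  · intro h
    obtain ⟨d, hd, he⟩ := List.mem_map.mp h
    exact (pv_char_toNat_inj he.symm) ▸ hd

-- the per-character test A performs, as a Bool
def pvCharSafe (c : Char) : Bool :=
  (('a' ≤ c && c ≤ 'z') || ('A' ≤ c && c ≤ 'Z')) || ":/?#[]@!$&'()*+,;=.".toList.contains c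

set_option maxRecDepth 8000 in
theorem pvCharSafe_iff_mem {c : Char} : pvCharSafe c = true ↔ c ∈ pvAllowed := by
  have hA : pvAllowed.map Char.toNat =
      [97, 98, 99, 100, 101, 102, 103, 104, 105, 106, 107, 108, 109, 110, 111, 112, 113, 114,
       115, 116, 117, 118, 119, 120, 121, 122, 65, 66, 67, 68, 69, 70, 71, 72, 73, 74, 75, 76,
       77, 78, 79, 80, 81, 82, 83, 84, 85, 86, 87, 88, 89, 90, 58, 47, 63, 35, 91, 93, 64, 33,
       36, 38, 39, 40, 41, 42, 43, 44, 59, 61, 46] := by decide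
  have hS : ":/?#[]@!$&'()*+,;=.".toList.map Char.toNat =
      [58, 47, 63, 35, 91, 93, 64, 33, 36, 38, 39, 40, 41, 42, 43, 44, 59, 61, 46] := by decide
  rw [pv_mem_map_toNat, hA]
  unfold pvCharSafe
  rw [Bool.or_eq_true, Bool.or_eq_true, Bool.and_eq_true, Bool.and_eq_true,
      List.contains_iff_mem, pv_mem_map_toNat, hS]
  simp only [decide_eq_true_eq, pv_char_le_iff]
  have e1 : Char.toNat 'a' = 97 := rfl
  have e2 : Char.toNat 'z' = 122 := rfl
  have e3 : Char.toNat 'A' = 65 := rfl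
  have e4 : Char.toNat 'Z' = 90 := rfl
  rw [e1, e2, e3, e4]
  generalize c.toNat = n
  simp only [List.mem_cons, List.not_mem_nil, or_false]
  omega

theorem pvScanChars_eq_all (cs : List Char) : pvScanChars cs = cs.all pvCharSafe := by
  induction cs with
  | nil => rfl
  | cons c rest ih =>
    rw [List.all_cons, ← ih]
    show (if (('a' ≤ c && c ≤ 'z') || ('A' ≤ c && c ≤ 'Z')) then pvScanChars rest
          else if !(":/?#[]@!$&'()*+,;=.".toList.contains c) then false
          else pvScanChars rest) = _
    unfold pvCharSafe
    cases h1 : (('a' ≤ c && c ≤ 'z') || ('A' ≤ c && c ≤ 'Z')) with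
    | true => simp
    | false =>
      cases h2 : (":/?#[]@!$&'()*+,;=.".toList.contains c) with
      | true => simp
      | false => simp

theorem pvScanLinks_eq_all (links : List String) :
    pvScanLinks links = links.all (fun s => s.toList.all pvCharSafe) := by
  induction links with
  | nil => rfl
  | cons l rest ih =>
    simp only [pvScanLinks, List.all_cons, pvScanChars_eq_all]
    cases h : (l.toList.all pvCharSafe) with
    | true => simp [ih]
    | false => simp

theorem pv_join_flatten : ∀ (parts : List (List Char)),
    PySem.Chars.join [] parts = parts.flatten := by
  intro parts
  induction parts with
  | nil => exact PySem.Chars.join_nil _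
  | cons a t ih =>
    cases t with
    | nil => simp [PySem.Chars.join_singleton]
    | cons b r =>
      rw [PySem.Chars.join_cons_cons]
      simp [ih]

theorem pv_mem_join {c : Char} {links : List String} :
    c ∈ (PySem.Str.join "" links).toList ↔ ∃ s ∈ links, c ∈ s.toList := by
  rw [PySem.Str.toList_join]
  show c ∈ PySem.Chars.join [] (links.map String.toList) ↔ _
  rw [pv_join_flatten]
  simp [List.mem_flatten, List.mem_map]

-- ===== VERDICT (by name: the statement is the Claim_ definition above) =====
theorem eval_links_spec : Claim_equal_eval_links := by
  intro links _
  unfold Spec_eval_links eval_links eval_links_alt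
  rw [Bool.eq_iff_iff, pvScanLinks_eq_all, PySem.Set.issubset_iff]
  simp only [List.all_eq_true, PySem.Set.mem_ofList, pv_mem_join]
  constructor
  · rintro h x ⟨s, hs, hc⟩
    exact pvCharSafe_iff_mem.mp (h s hs x hc)
  · intro h s hs x hc
    exact pvCharSafe_iff_mem.mpr (h x ⟨s, hs, hc⟩)
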